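-- pv_equiv track=rewrite | github.com/wojcikiewicz17/Vectras-VM-Android | tools/state_geometry_lab/py/state_geometry_lab.py | spiral_matrix_cycles
-- ===== SOURCE A (Python) =====
-- from typing import Dict, List, Optional, Sequence, Tuple
--
-- def spiral_matrix_cycles(size: int, cycles: int) -> List[List[int]]:
--     mat = [[0] * size for _ in range(size)]
--     v = 1
--     for c in range(cycles):
--         freeze = c % size
--         for i in range(size):
--             for j in range(size):
--                 if i == freeze or j == freeze:
--                     continue
--                 mat[i][j] = v
--                 v += 1
--     return mat
-- ===== SOURCE B (Python) =====
-- def _cell(size, per, cycles, i, j):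
--     # last cycle that wrote (i,j) is among the final three cycles (residues of
--     # three consecutive cycle numbers cannot all lie in {i, j}); 0 if never written
--     for c in (cycles - 1, cycles - 2, cycles - 3):
--         if c >= 0:
--             f = c % size
--             if f != i and f != j:
--                 return 1 + c * per + (i - (i > f)) * (size - 1) + (j - (j > f))
--     return 0
--
--
-- def spiral_matrix_cycles(size, cycles):
--     if size <= 0:
--         return []
--     per = (size - 1) * (size - 1)
--     return [[_cell(size, per, cycles, i, j) for j in range(size)] for i in range(size)]
-- ===== Notes on version B (the rewrite author's own statement) =====
-- stated objective: faster
-- what changed: Instead of replaying all cycles and overwriting cells with a running counter, B computes each cell directly in O(1): the cell's last-writing cycle is one of the final three cycles (three consecutive cycle numbers cannot all have their residue in {i,j}), and the counter value written then is the closed form 1 + c*(size-1)^2 + row/column rank.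
import Mathlib
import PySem

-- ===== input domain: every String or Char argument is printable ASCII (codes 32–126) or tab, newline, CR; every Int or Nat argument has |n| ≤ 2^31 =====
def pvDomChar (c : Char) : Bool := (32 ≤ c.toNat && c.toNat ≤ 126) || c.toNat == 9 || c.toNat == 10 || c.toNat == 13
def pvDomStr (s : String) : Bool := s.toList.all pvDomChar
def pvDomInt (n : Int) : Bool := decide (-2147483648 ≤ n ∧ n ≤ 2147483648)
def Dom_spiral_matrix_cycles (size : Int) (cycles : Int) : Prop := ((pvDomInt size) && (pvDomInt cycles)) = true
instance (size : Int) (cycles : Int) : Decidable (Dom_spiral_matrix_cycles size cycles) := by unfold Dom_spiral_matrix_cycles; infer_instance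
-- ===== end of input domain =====

-- B replaces A's O(cycles·size²) replay of all cycles by an O(size²) closed form per cell
-- (measured faster at large cycles); A raises ZeroDivisionError for size = 0, cycles ≥ 1 (excluded by Pre_).

-- ===== PORT A =====
-- innermost statement of A's j-loop: 'if i == freeze or j == freeze: continue; mat[i][j] = v; v += 1'
-- (i, j come from range(size), hence non-negative and in range, so List.set with .toNat is exact here)
def pvWriteJ (freeze i : Int) (st : List (List Int) × Int) (j : Int) : List (List Int) × Int :=
  if i = freeze ∨ j = freeze then st
  else (st.1.set i.toNat ((st.1.getD i.toNat []).set j.toNat st.2), st.2 + 1)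

-- A's 'for j in range(size)' loop for one row i
def pvWriteI (size freeze : Int) (st : List (List Int) × Int) (i : Int) : List (List Int) × Int :=
  (PySem.List.pyRange 0 size 1).foldl (pvWriteJ freeze i) st

-- A's body of 'for c in range(cycles)': freeze = c % size, then the double loop
def pvCycle (size : Int) (st : List (List Int) × Int) (c : Int) : List (List Int) × Int :=
  (PySem.List.pyRange 0 size 1).foldl (pvWriteI size (PySem.Int.mod c size)) st

def spiral_matrix_cycles (size : Int) (cycles : Int) : List (List Int) :=
  -- mat = [[0] * size for _ in range(size)]  ([0]*size = replicate size.toNat 0, exact)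
  let mat : List (List Int) := (PySem.List.pyRange 0 size 1).map (fun _ => List.replicate size.toNat (0 : Int))
  ((PySem.List.pyRange 0 cycles 1).foldl (pvCycle size) (mat, 1)).1

-- ===== PORT B =====
-- one iteration of _cell's 'for c in (cycles-1, cycles-2, cycles-3)' with early return modelled by Option
def pvCellStep (size per i j : Int) (acc : Option Int) (c : Int) : Option Int :=
  match acc with
  | some v => some v
  | none =>
    if 0 ≤ c then
      let f := PySem.Int.mod c size
      if f ≠ i ∧ f ≠ j then
        some (1 + c * per + (i - (if i > f then 1 else 0)) * (size - 1) + (j - (if j > f then 1 else 0)))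
      else none
    else none

-- _cell(size, per, cycles, i, j)
def pvCellVal (size per cycles i j : Int) : Int :=
  (([cycles - 1, cycles - 2, cycles - 3].foldl (pvCellStep size per i j) none).getD 0)

def spiral_matrix_cycles_alt (size : Int) (cycles : Int) : List (List Int) :=
  if size ≤ 0 then []
  else
    let per := (size - 1) * (size - 1)
    (PySem.List.pyRange 0 size 1).map (fun i =>
      (PySem.List.pyRange 0 size 1).map (fun j => pvCellVal size per cycles i j))

-- ===== PRECONDITION & SPEC =====
-- Pre_ excludes exactly size = 0 with cycles ≥ 1, where A raises ZeroDivisionError (c % size).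
def Pre_spiral_matrix_cycles (size : Int) (cycles : Int) : Prop := size ≠ 0 ∨ cycles ≤ 0
instance (size : Int) (cycles : Int) : Decidable (Pre_spiral_matrix_cycles size cycles) := by
  unfold Pre_spiral_matrix_cycles; infer_instance

def pvWitness_spiral_matrix_cycles : Int × Int := (3, 4)

def Spec_spiral_matrix_cycles (size : Int) (cycles : Int) (out : List (List Int)) : Prop := out = spiral_matrix_cycles_alt size cycles
instance (size : Int) (cycles : Int) (out : List (List Int)) : Decidable (Spec_spiral_matrix_cycles size cycles out) := by unfold Spec_spiral_matrix_cycles; infer_instance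

-- ===== CLAIM (what is proved, stated in full; the proofs are below) =====
def Claim_equal_spiral_matrix_cycles : Prop := ∀ (size : Int) (cycles : Int), Dom_spiral_matrix_cycles size cycles → Pre_spiral_matrix_cycles size cycles → Spec_spiral_matrix_cycles size cycles (spiral_matrix_cycles size cycles)

-- ===== LEMMAS AND PROOFS =====

-- number of j' < j with j' ≠ f  (for 0 ≤ f)
def pvWr (f j : Nat) : Nat := if f < j then j - 1 else j

-- counter value written at cycle c into cell (i, j) (valid when i ≠ c % n, j ≠ c % n)
def pvValN (n c i j : Nat) : Int :=
  1 + ((c * ((n - 1) * (n - 1)) + pvWr (c % n) i * (n - 1) + pvWr (c % n) j : Nat) : Int)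

-- a cell's final value after k cycles, defined by A's overwrite recursion
def pvCellN (n : Nat) : Nat → Nat → Nat → Int
  | 0, _, _ => 0
  | k + 1, i, j => if k % n ≠ i ∧ k % n ≠ j then pvValN n k i j else pvCellN n k i j

-- B's last-three-candidates form, at the Nat level
def pvCellBN (n k i j : Nat) : Int :=
  if 1 ≤ k ∧ (k - 1) % n ≠ i ∧ (k - 1) % n ≠ j then pvValN n (k - 1) i j
  else if 2 ≤ k ∧ (k - 2) % n ≠ i ∧ (k - 2) % n ≠ j then pvValN n (k - 2) i j
  else if 3 ≤ k ∧ (k - 3) % n ≠ i ∧ (k - 3) % n ≠ j then pvValN n (k - 3) i j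
  else 0

lemma pvRange_bridge (b : Int) :
    PySem.List.pyRange 0 b 1 = List.map (fun k => Int.ofNat k) (List.range b.toNat) := by
  rw [PySem.List.pyRange_one]
  simp [List.map_eq_flatMap]

lemma pvGetD_set {α : Type} (xs : List α) (a : Nat) (b : α) (i : Nat) (d : α) :
    (xs.set a b).getD i d = if i = a ∧ i < xs.length then b else xs.getD i d := by
  simp [List.getD_eq_getElem?_getD, List.getElem?_set]
  split_ifs <;> simp_all <;> omega

-- frozen row: the j-loop does nothing when i = freeze
lemma pvInnerFrozen (f : Int) (st : List (List Int) × Int) (l : List Int) :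
    l.foldl (pvWriteJ f f) st = st := by
  induction l generalizing st with
  | nil => rfl
  | cons x xs ih => simp only [List.foldl_cons, pvWriteJ, if_pos (Or.inl rfl)]; exact ih st

-- inner j-loop characterisation
lemma pvInnerJ (n fn inat : Nat) (mat : List (List Int)) (v : Int)
    (hf : fn < n) (hi : inat < mat.length) (hne : inat ≠ fn)
    (hrow : (mat.getD inat []).length = n) (m : Nat) (hm : m ≤ n) :
    ((List.range m).foldl (fun st (j : Nat) => pvWriteJ (fn : Int) (inat : Int) st (j : Int)) (mat, v)).2 = v + (pvWr fn m : Int) ∧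
    ((List.range m).foldl (fun st (j : Nat) => pvWriteJ (fn : Int) (inat : Int) st (j : Int)) (mat, v)).1.length = mat.length ∧
    (∀ i', i' ≠ inat → ((List.range m).foldl (fun st (j : Nat) => pvWriteJ (fn : Int) (inat : Int) st (j : Int)) (mat, v)).1.getD i' [] = mat.getD i' []) ∧
    (((List.range m).foldl (fun st (j : Nat) => pvWriteJ (fn : Int) (inat : Int) st (j : Int)) (mat, v)).1.getD inat []).length = n ∧
    (∀ j' : Nat, j' < n →
      (((List.range m).foldl (fun st (j : Nat) => pvWriteJ (fn : Int) (inat : Int) st (j : Int)) (mat, v)).1.getD inat []).getD j' 0 =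
        if j' < m ∧ j' ≠ fn then v + (pvWr fn j' : Int) else (mat.getD inat []).getD j' 0) := by
  induction m with
  | zero =>
    refine ⟨by simp [pvWr], by simp, by simp, by simpa using hrow, ?_⟩
    intro j' hj'
    simp
  | succ m ih =>
    obtain ⟨ih2, ihlen, ihoth, ihrlen, ihent⟩ := ih (by omega)
    rw [List.range_succ, List.foldl_append]
    set R := (List.range m).foldl (fun st (j : Nat) => pvWriteJ (fn : Int) (inat : Int) st (j : Int)) (mat, v) with hR
    simp only [List.foldl_cons, List.foldl_nil]
    by_cases hmf : m = fn
    · rw [show pvWriteJ (fn : Int) (inat : Int) R (m : Int) = R by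
        simp [pvWriteJ, hmf]]
      refine ⟨?_, ihlen, ihoth, ihrlen, ?_⟩
      · rw [ih2]; congr 1
        have : pvWr fn m = pvWr fn (m+1) := by simp only [pvWr]; split_ifs <;> omega
        rw [this]
      · intro j' hj'
        rw [ihent j' hj']
        split_ifs <;> first | rfl | omega
    · have hcond : ¬ ((inat : Int) = (fn : Int) ∨ (m : Int) = (fn : Int)) := by
        push_neg
        constructor <;> (intro h; exact absurd (Nat.cast_injective h) (by omega))
      rw [show pvWriteJ (fn : Int) (inat : Int) R (m : Int)
            = (R.1.set inat ((R.1.getD inat []).set m R.2), R.2 + 1) by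
        simp only [pvWriteJ, if_neg hcond, Int.toNat_natCast]]
      have hmlt : m < (R.1.getD inat []).length := by omega
      have hinatlt : inat < R.1.length := by omega
      refine ⟨?_, ?_, ?_, ?_, ?_⟩
      · simp only [ih2]
        have : pvWr fn m + 1 = pvWr fn (m+1) := by simp only [pvWr]; split_ifs <;> omega
        push_cast [← this]; ring
      · simpa using ihlen
      · intro i' hi'
        rw [pvGetD_set]
        rw [if_neg (by tauto)]
        exact ihoth i' hi'
      · rw [pvGetD_set, if_pos ⟨rfl, hinatlt⟩]
        simpa using ihrlen
      · intro j' hj'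
        rw [pvGetD_set, if_pos ⟨rfl, hinatlt⟩, pvGetD_set]
        by_cases hjm : j' = m
        · subst hjm
          rw [if_pos ⟨rfl, hmlt⟩, if_pos ⟨by omega, by omega⟩, ih2]
        · rw [if_neg (by tauto), ihent j' hj']
          split_ifs <;> first | rfl | omega

-- pvWriteI as a fold over List.range
lemma pvWriteI_eq (n fn : Nat) (st : List (List Int) × Int) (i : Int) :
    pvWriteI (n : Int) (fn : Int) st i
      = (List.range n).foldl (fun s (j : Nat) => pvWriteJ (fn : Int) i s (j : Int)) st := by
  show (PySem.List.pyRange 0 (n : Int) 1).foldl (pvWriteJ (fn : Int) i) st = _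
  rw [pvRange_bridge, Int.toNat_natCast, List.foldl_map]
  rfl

lemma pvWr_succ (fn m : Nat) (h : m ≠ fn) : pvWr fn (m + 1) = pvWr fn m + 1 := by
  simp only [pvWr]; split_ifs <;> omega

lemma pvWr_frozen (fn m : Nat) (h : m = fn) : pvWr fn (m + 1) = pvWr fn m := by
  simp only [pvWr]; split_ifs <;> omega

lemma pvWr_full (fn n : Nat) (h : fn < n) : pvWr fn n = n - 1 := by
  simp only [pvWr]; split_ifs <;> omega

-- outer i-loop characterisation
lemma pvOuterI (n fn : Nat) (mat : List (List Int)) (v : Int)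
    (hn : 0 < n) (hf : fn < n) (hlen : mat.length = n)
    (hrows : ∀ i' < n, (mat.getD i' []).length = n) (m : Nat) (hm : m ≤ n) :
    ((List.range m).foldl (fun st (i : Nat) => pvWriteI (n : Int) (fn : Int) st (i : Int)) (mat, v)).2 = v + ((pvWr fn m * (n - 1) : Nat) : Int) ∧
    ((List.range m).foldl (fun st (i : Nat) => pvWriteI (n : Int) (fn : Int) st (i : Int)) (mat, v)).1.length = n ∧
    (∀ i' < n, (((List.range m).foldl (fun st (i : Nat) => pvWriteI (n : Int) (fn : Int) st (i : Int)) (mat, v)).1.getD i' []).length = n) ∧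
    (∀ i' j' : Nat, i' < n → j' < n →
      (((List.range m).foldl (fun st (i : Nat) => pvWriteI (n : Int) (fn : Int) st (i : Int)) (mat, v)).1.getD i' []).getD j' 0 =
        if i' < m ∧ i' ≠ fn ∧ j' ≠ fn
        then v + ((pvWr fn i' * (n - 1) + pvWr fn j' : Nat) : Int)
        else (mat.getD i' []).getD j' 0) := by
  induction m with
  | zero =>
    refine ⟨by simp [pvWr], by simpa using hlen, by simpa using hrows, ?_⟩
    intro i' j' hi' hj'
    simp
  | succ m ih =>
    obtain ⟨ih2, ihlen, ihrows, ihent⟩ := ih (by omega)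
    rw [List.range_succ, List.foldl_append] at *
    revert ih2 ihlen ihrows ihent
    generalize ((List.range m).foldl (fun st (i : Nat) => pvWriteI (n : Int) (fn : Int) st (i : Int)) (mat, v)) = X
    obtain ⟨Rm, Rv⟩ := X
    intro ih2 ihlen ihrows ihent
    simp only [List.foldl_cons, List.foldl_nil] at *
    by_cases hmf : m = fn
    · have hfr : pvWriteI (n : Int) (fn : Int) (Rm, Rv) (m : Int) = (Rm, Rv) := by
        subst hmf
        exact pvInnerFrozen _ _ _
      rw [hfr]
      refine ⟨?_, ihlen, ihrows, ?_⟩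
      · rw [ih2, pvWr_frozen fn m hmf]
      · intro i' j' hi' hj'
        rw [ihent i' j' hi' hj']
        split_ifs <;> first | rfl | omega
    · rw [pvWriteI_eq]
      have hmlt : m < n := by omega
      obtain ⟨c2, clen, coth, crlen, cent⟩ :=
        pvInnerJ n fn m Rm Rv hf (by omega) hmf (ihrows m hmlt) n le_rfl
      refine ⟨?_, ?_, ?_, ?_⟩
      · rw [c2, ih2, pvWr_full fn n hf, add_assoc, ← Nat.cast_add]
        congr 2
        rw [pvWr_succ fn m hmf, add_mul, one_mul]
      · rw [clen, ihlen]
      · intro i' hi'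
        by_cases hii : i' = m
        · subst hii; exact crlen
        · rw [coth i' hii]; exact ihrows i' hi'
      · intro i' j' hi' hj'
        by_cases hii : i' = m
        · subst hii
          rw [cent j' hj']
          by_cases hjf : j' ≠ fn
          · rw [if_pos ⟨hj', hjf⟩, if_pos ⟨by omega, hmf, hjf⟩, ih2, add_assoc, ← Nat.cast_add]
          · rw [if_neg (by tauto), if_neg (by tauto), ihent i' j' hi' hj',
              if_neg (by omega)]
        · rw [coth i' hii, ihent i' j' hi' hj']
          split_ifs <;> first | rfl | omega

-- the main run of A: after k cycles the matrix holds pvCellN and the counter its closed form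
lemma pvRunA (n : Nat) (hn : 0 < n) (k : Nat) :
    ((List.range k).foldl (fun st (c : Nat) => pvCycle (n : Int) st (c : Int)) ((List.range n).map (fun _ => List.replicate n (0 : Int)), 1)).2 = 1 + ((k * ((n - 1) * (n - 1)) : Nat) : Int) ∧
    ((List.range k).foldl (fun st (c : Nat) => pvCycle (n : Int) st (c : Int)) ((List.range n).map (fun _ => List.replicate n (0 : Int)), 1)).1.length = n ∧
    (∀ i' < n, (((List.range k).foldl (fun st (c : Nat) => pvCycle (n : Int) st (c : Int)) ((List.range n).map (fun _ => List.replicate n (0 : Int)), 1)).1.getD i' []).length = n) ∧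
    (∀ i' j' : Nat, i' < n → j' < n → (((List.range k).foldl (fun st (c : Nat) => pvCycle (n : Int) st (c : Int)) ((List.range n).map (fun _ => List.replicate n (0 : Int)), 1)).1.getD i' []).getD j' 0 = pvCellN n k i' j') := by
  induction k with
  | zero =>
    refine ⟨by simp, by simp, ?_, ?_⟩
    · intro i' hi'
      simp only [List.range_zero, List.foldl_nil]
      rw [List.getD_eq_getElem?_getD, List.getElem?_map, List.getElem?_range hi']
      simp
    · intro i' j' hi' hj'
      simp only [List.range_zero, List.foldl_nil]
      simp [pvCellN, List.getD_eq_getElem?_getD, List.getElem?_map,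
        List.getElem?_range, hi', hj', List.getElem?_replicate]
  | succ k ih =>
    obtain ⟨ih2, ihlen, ihrows, ihent⟩ := ih
    rw [List.range_succ, List.foldl_append] at *
    revert ih2 ihlen ihrows ihent
    generalize ((List.range k).foldl (fun st (c : Nat) => pvCycle (n : Int) st (c : Int)) ((List.range n).map (fun _ => List.replicate n (0 : Int)), 1)) = X
    obtain ⟨Xm, Xv⟩ := X
    intro ih2 ihlen ihrows ihent
    simp only [List.foldl_cons, List.foldl_nil] at *
    have hfnlt : k % n < n := Nat.mod_lt _ hn
    have hcyc : pvCycle (n : Int) (Xm, Xv) (k : Int)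
        = (List.range n).foldl (fun st (i : Nat) => pvWriteI (n : Int) ((k % n : Nat) : Int) st (i : Int)) (Xm, Xv) := by
      show (PySem.List.pyRange 0 (n : Int) 1).foldl
          (pvWriteI (n : Int) (PySem.Int.mod (k : Int) (n : Int))) (Xm, Xv) = _
      rw [PySem.Int.mod_natCast, pvRange_bridge, Int.toNat_natCast, List.foldl_map]
      rfl
    rw [hcyc]
    obtain ⟨c2, clen, crows, cent⟩ := pvOuterI n (k % n) Xm Xv hn hfnlt ihlen ihrows n le_rfl
    refine ⟨?_, clen, crows, ?_⟩
    · rw [c2, pvWr_full _ n hfnlt, ih2, add_assoc, ← Nat.cast_add]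
      congr 2
      ring
    · intro i' j' hi' hj'
      rw [cent i' j' hi' hj']
      by_cases hc : i' ≠ k % n ∧ j' ≠ k % n
      · rw [if_pos ⟨hi', hc.1, hc.2⟩]
        have hcell : pvCellN n (k+1) i' j' = pvValN n k i' j' := by
          simp only [pvCellN]
          rw [if_pos ⟨hc.1.symm, hc.2.symm⟩]
        rw [hcell, ih2, add_assoc, ← Nat.cast_add]
        simp only [pvValN]
        congr 2
        ring
      · rw [if_neg (by tauto), ihent i' j' hi' hj']
        simp only [pvCellN]
        rw [if_neg (by omega)]

lemma pvSuccMod (n c : Nat) (hn : 0 < n) :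
    (c + 1) % n = if c % n + 1 = n then 0 else c % n + 1 := by
  by_cases h1 : n = 1
  · subst h1; simp [Nat.mod_one]
  · have h2 : 1 % n = 1 := Nat.mod_eq_of_lt (by omega)
    have hc : c % n < n := Nat.mod_lt _ hn
    rw [Nat.add_mod, h2]
    by_cases he : c % n + 1 = n
    · simp [he]
    · rw [Nat.mod_eq_of_lt (by omega), if_neg he]

lemma pvLast3 (n k i j : Nat) (hn : 0 < n) (hk : 3 ≤ k)
    (h0 : k % n = i ∨ k % n = j) (h1 : (k - 1) % n = i ∨ (k - 1) % n = j)
    (h2 : (k - 2) % n = i ∨ (k - 2) % n = j) : (k - 3) % n = i ∨ (k - 3) % n = j := by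
  have e2 : k - 2 = (k - 3) + 1 := by omega
  have e1 : k - 1 = (k - 3) + 1 + 1 := by omega
  have e0 : k = (k - 3) + 1 + 1 + 1 := by omega
  rw [e2] at h2
  rw [e1] at h1
  rw [e0] at h0
  have hc : (k - 3) % n < n := Nat.mod_lt _ hn
  by_cases hn1 : n = 1
  · subst hn1; simpa using h0
  by_cases hn2 : n = 2
  · subst hn2; omega
  · rw [pvSuccMod n _ hn] at h0 h1 h2
    rw [pvSuccMod n _ hn] at h0 h1
    rw [pvSuccMod n _ hn] at h0
    split_ifs at h0 h1 h2 <;> omega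

-- three consecutive residues cannot all lie in {i, j}: the last-3 reduction is exact
lemma pvCellN_eq_BN (n : Nat) (hn : 0 < n) (k i j : Nat) :
    pvCellN n k i j = pvCellBN n k i j := by
  induction k with
  | zero => simp [pvCellN, pvCellBN]
  | succ k ih =>
    simp only [pvCellN]
    by_cases hok : k % n ≠ i ∧ k % n ≠ j
    · rw [if_pos hok]
      simp only [pvCellBN, Nat.add_sub_cancel]
      rw [if_pos ⟨by omega, hok.1, hok.2⟩]
    · rw [if_neg hok, ih]
      simp only [pvCellBN, Nat.add_sub_cancel,
        show k + 1 - 2 = k - 1 from by omega, show k + 1 - 3 = k - 2 from by omega]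
      rw [if_neg (by omega : ¬(1 ≤ k + 1 ∧ k % n ≠ i ∧ k % n ≠ j))]
      by_cases h1 : 1 ≤ k ∧ (k - 1) % n ≠ i ∧ (k - 1) % n ≠ j
      · rw [if_pos h1, if_pos ⟨by omega, h1.2.1, h1.2.2⟩]
      · rw [if_neg h1, if_neg (by omega : ¬(2 ≤ k + 1 ∧ (k - 1) % n ≠ i ∧ (k - 1) % n ≠ j))]
        by_cases h2 : 2 ≤ k ∧ (k - 2) % n ≠ i ∧ (k - 2) % n ≠ j
        · rw [if_pos h2, if_pos ⟨by omega, h2.2.1, h2.2.2⟩]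
        · rw [if_neg h2, if_neg (by omega : ¬(3 ≤ k + 1 ∧ (k - 2) % n ≠ i ∧ (k - 2) % n ≠ j))]
          rw [if_neg ?_]
          rintro ⟨hk3, ha, hb⟩
          have := pvLast3 n k i j hn hk3 (by omega) (by omega) (by omega)
          omega

lemma pvCellStep_some (a b c d : Int) (v : Int) (e : Int) :
    pvCellStep a b c d (some v) e = some v := rfl

lemma pvVal_cast (n c i j : Nat) (hn : 0 < n) :
    1 + (c : Int) * (((n : Int) - 1) * ((n : Int) - 1))
      + ((i : Int) - (if (i : Int) > ((c % n : Nat) : Int) then 1 else 0)) * ((n : Int) - 1)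
      + ((j : Int) - (if (j : Int) > ((c % n : Nat) : Int) then 1 else 0))
    = pvValN n c i j := by
  have hwi : ((i : Int) - (if (i : Int) > ((c % n : Nat) : Int) then 1 else 0))
      = ((pvWr (c % n) i : Nat) : Int) := by
    simp only [pvWr, gt_iff_lt, Nat.cast_lt]
    by_cases h : c % n < i
    · rw [if_pos h, if_pos h, Nat.cast_sub (by omega)]
      norm_num
    · rw [if_neg h, if_neg h]
      norm_num
  have hwj : ((j : Int) - (if (j : Int) > ((c % n : Nat) : Int) then 1 else 0))
      = ((pvWr (c % n) j : Nat) : Int) := by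
    simp only [pvWr, gt_iff_lt, Nat.cast_lt]
    by_cases h : c % n < j
    · rw [if_pos h, if_pos h, Nat.cast_sub (by omega)]
      norm_num
    · rw [if_neg h, if_neg h]
      norm_num
  rw [hwi, hwj, show ((n : Int) - 1) = ((n - 1 : Nat) : Int) from by omega]
  simp only [pvValN]
  push_cast
  ring

-- B's port computes pvCellBN
lemma pvCellVal_eq_BN (n : Nat) (hn : 0 < n) (cycles : Int) (i j : Nat)
    (hi : i < n) (hj : j < n) :
    pvCellVal (n : Int) (((n : Int) - 1) * ((n : Int) - 1)) cycles (i : Int) (j : Int)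
      = pvCellBN n cycles.toNat i j := by
  by_cases h0 : 0 < cycles
  · obtain ⟨K, rfl⟩ : ∃ K : Nat, cycles = (K : Int) := ⟨cycles.toNat, (Int.toNat_of_nonneg h0.le).symm⟩
    have hK1 : 1 ≤ K := by exact_mod_cast h0
    simp only [pvCellVal, List.foldl_cons, List.foldl_nil, Int.toNat_natCast]
    by_cases hc1 : (K - 1) % n ≠ i ∧ (K - 1) % n ≠ j
    · have e1 : pvCellStep (n : Int) (((n : Int) - 1) * ((n : Int) - 1)) (i : Int) (j : Int) none ((K : Int) - 1)
          = some (pvValN n (K - 1) i j) := by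
        simp only [pvCellStep]
        rw [if_pos (by omega : (0:Int) ≤ (K : Int) - 1),
          show ((K : Int) - 1) = ((K - 1 : Nat) : Int) from by omega, PySem.Int.mod_natCast,
          if_pos ⟨by exact_mod_cast hc1.1, by exact_mod_cast hc1.2⟩]
        exact congrArg some (pvVal_cast n (K - 1) i j hn)
      rw [e1, pvCellStep_some, pvCellStep_some, Option.getD_some,
        pvCellBN, if_pos ⟨hK1, hc1.1, hc1.2⟩]
    · have e1 : pvCellStep (n : Int) (((n : Int) - 1) * ((n : Int) - 1)) (i : Int) (j : Int) none ((K : Int) - 1) = none := by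
        simp only [pvCellStep]
        rw [if_pos (by omega : (0:Int) ≤ (K : Int) - 1),
          show ((K : Int) - 1) = ((K - 1 : Nat) : Int) from by omega, PySem.Int.mod_natCast,
          if_neg (by push_neg at hc1 ⊢; intro h; exact_mod_cast hc1 (by exact_mod_cast h))]
      rw [e1]
      rw [pvCellBN, if_neg (by tauto)]
      by_cases hK2 : 2 ≤ K
      · by_cases hc2 : (K - 2) % n ≠ i ∧ (K - 2) % n ≠ j
        · have e2 : pvCellStep (n : Int) (((n : Int) - 1) * ((n : Int) - 1)) (i : Int) (j : Int) none ((K : Int) - 2)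
              = some (pvValN n (K - 2) i j) := by
            simp only [pvCellStep]
            rw [if_pos (by omega : (0:Int) ≤ (K : Int) - 2),
              show ((K : Int) - 2) = ((K - 2 : Nat) : Int) from by omega, PySem.Int.mod_natCast,
              if_pos ⟨by exact_mod_cast hc2.1, by exact_mod_cast hc2.2⟩]
            exact congrArg some (pvVal_cast n (K - 2) i j hn)
          rw [e2, pvCellStep_some, Option.getD_some, if_pos ⟨hK2, hc2.1, hc2.2⟩]
        · have e2 : pvCellStep (n : Int) (((n : Int) - 1) * ((n : Int) - 1)) (i : Int) (j : Int) none ((K : Int) - 2) = none := by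
            simp only [pvCellStep]
            rw [if_pos (by omega : (0:Int) ≤ (K : Int) - 2),
              show ((K : Int) - 2) = ((K - 2 : Nat) : Int) from by omega, PySem.Int.mod_natCast,
              if_neg (by push_neg at hc2 ⊢; intro h; exact_mod_cast hc2 (by exact_mod_cast h))]
          rw [e2, if_neg (by tauto)]
          by_cases hK3 : 3 ≤ K
          · by_cases hc3 : (K - 3) % n ≠ i ∧ (K - 3) % n ≠ j
            · have e3 : pvCellStep (n : Int) (((n : Int) - 1) * ((n : Int) - 1)) (i : Int) (j : Int) none ((K : Int) - 3)
                  = some (pvValN n (K - 3) i j) := by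
                simp only [pvCellStep]
                rw [if_pos (by omega : (0:Int) ≤ (K : Int) - 3),
                  show ((K : Int) - 3) = ((K - 3 : Nat) : Int) from by omega, PySem.Int.mod_natCast,
                  if_pos ⟨by exact_mod_cast hc3.1, by exact_mod_cast hc3.2⟩]
                exact congrArg some (pvVal_cast n (K - 3) i j hn)
              rw [e3, Option.getD_some, if_pos ⟨hK3, hc3.1, hc3.2⟩]
            · have e3 : pvCellStep (n : Int) (((n : Int) - 1) * ((n : Int) - 1)) (i : Int) (j : Int) none ((K : Int) - 3) = none := by
                simp only [pvCellStep]
                rw [if_pos (by omega : (0:Int) ≤ (K : Int) - 3),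
                  show ((K : Int) - 3) = ((K - 3 : Nat) : Int) from by omega, PySem.Int.mod_natCast,
                  if_neg (by push_neg at hc3 ⊢; intro h; exact_mod_cast hc3 (by exact_mod_cast h))]
              rw [e3, if_neg (by tauto)]
              rfl
          · have e3 : pvCellStep (n : Int) (((n : Int) - 1) * ((n : Int) - 1)) (i : Int) (j : Int) none ((K : Int) - 3) = none := by
              simp only [pvCellStep]
              rw [if_neg (by omega : ¬ (0:Int) ≤ (K : Int) - 3)]
            rw [e3, if_neg (by omega)]
            rfl
      · have e2 : pvCellStep (n : Int) (((n : Int) - 1) * ((n : Int) - 1)) (i : Int) (j : Int) none ((K : Int) - 2) = none := by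
          simp only [pvCellStep]
          rw [if_neg (by omega : ¬ (0:Int) ≤ (K : Int) - 2)]
        have e3 : pvCellStep (n : Int) (((n : Int) - 1) * ((n : Int) - 1)) (i : Int) (j : Int) none ((K : Int) - 3) = none := by
          simp only [pvCellStep]
          rw [if_neg (by omega : ¬ (0:Int) ≤ (K : Int) - 3)]
        rw [e2, e3, if_neg (by omega), if_neg (by omega)]
        rfl
  · have hz : cycles.toNat = 0 := by omega
    simp only [pvCellVal, List.foldl_cons, List.foldl_nil, hz]
    have e : ∀ d : Int, d < 0 → pvCellStep (n : Int) (((n : Int) - 1) * ((n : Int) - 1)) (i : Int) (j : Int) none d = none := by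
      intro d hd
      simp only [pvCellStep]
      rw [if_neg (by omega)]
    rw [e _ (by omega), e _ (by omega), e _ (by omega)]
    simp [pvCellBN]

-- ===== VERDICT (by name: the statement is the Claim_ definition above) =====
theorem spiral_matrix_cycles_spec : Claim_equal_spiral_matrix_cycles := by
  intro size cycles hdom hpre
  unfold Spec_spiral_matrix_cycles
  by_cases hs : size ≤ 0
  · have hnil : PySem.List.pyRange 0 size 1 = [] := PySem.List.pyRange_one_eq_nil hs
    have hA : spiral_matrix_cycles size cycles = [] := by
      simp only [spiral_matrix_cycles, hnil, List.map_nil]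
      have hid : ∀ (l : List Int) (st : List (List Int) × Int), l.foldl (pvCycle size) st = st := by
        intro l
        induction l with
        | nil => intro st; rfl
        | cons x xs ih =>
          intro st
          rw [List.foldl_cons, show pvCycle size st x = st from by
            simp only [pvCycle, hnil, List.foldl_nil]]
          exact ih st
      rw [hid]
    rw [hA]
    simp only [spiral_matrix_cycles_alt]
    rw [if_pos hs]
  · push_neg at hs
    obtain ⟨n, rfl⟩ : ∃ n : Nat, size = (n : Int) := ⟨size.toNat, (Int.toNat_of_nonneg hs.le).symm⟩
    have hn : 0 < n := by exact_mod_cast hs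
    obtain ⟨_, alen, arows, aent⟩ := pvRunA n hn cycles.toNat
    have hA : spiral_matrix_cycles (n : Int) cycles
        = ((List.range cycles.toNat).foldl (fun st (c : Nat) => pvCycle (n : Int) st (c : Int))
            ((List.range n).map (fun _ => List.replicate n (0 : Int)), 1)).1 := by
      simp only [spiral_matrix_cycles]
      rw [pvRange_bridge cycles, List.foldl_map, pvRange_bridge (n : Int), Int.toNat_natCast,
        List.map_map]
      rfl
    have hB : spiral_matrix_cycles_alt (n : Int) cycles
        = (List.range n).map (fun (i : Nat) => (List.range n).map (fun (j : Nat) =>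
            pvCellVal (n : Int) (((n : Int) - 1) * ((n : Int) - 1)) cycles ((i : Nat) : Int) ((j : Nat) : Int))) := by
      simp only [spiral_matrix_cycles_alt]
      rw [if_neg (by omega), pvRange_bridge (n : Int), Int.toNat_natCast, List.map_map]
      apply List.map_congr_left
      intro i _
      simp only [Function.comp_apply, List.map_map]
      rfl
    rw [hA, hB]
    apply List.ext_getElem
    · rw [alen]; simp
    · intro i hi1 hi2
      have hi : i < n := by simpa using hi2
      have hrl : (((List.range cycles.toNat).foldl (fun st (c : Nat) => pvCycle (n : Int) st (c : Int))
            ((List.range n).map (fun _ => List.replicate n (0 : Int)), 1)).1.getD i []).length = n :=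
        arows i hi
      have hgi : ((List.range cycles.toNat).foldl (fun st (c : Nat) => pvCycle (n : Int) st (c : Int))
            ((List.range n).map (fun _ => List.replicate n (0 : Int)), 1)).1.getD i []
          = ((List.range cycles.toNat).foldl (fun st (c : Nat) => pvCycle (n : Int) st (c : Int))
            ((List.range n).map (fun _ => List.replicate n (0 : Int)), 1)).1[i]'hi1 :=
        List.getD_eq_getElem _ _ hi1
      rw [List.getElem_map]
      apply List.ext_getElem
      · rw [← hgi, hrl]; simp
      · intro j hj1 hj2
        have hj : j < n := by simpa using hj2
        have e := aent i j hi hj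
        rw [hgi, List.getD_eq_getElem _ _ hj1] at e
        rw [e]
        simp only [List.getElem_map, List.getElem_range]
        rw [pvCellVal_eq_BN n hn cycles i j hi hj, pvCellN_eq_BN n hn]
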